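-- pv_equiv track=rewrite | github.com/MaverickMango/D4JPatches | subset_compare.py | split_name_by_project
-- ===== SOURCE A (Python) =====
-- def split_name_by_project(bugs_names, split):
--     splited_count = {}
--     for bug_name in bugs_names:
--         pid = bug_name.split(split)[0]
--         if pid not in splited_count.keys():
--             splited_count.update({pid: 1})
--         else:
--             splited_count[pid] += 1
--     return splited_count
-- ===== SOURCE B (Python) =====
-- def split_name_by_project(bugs_names, split):
--     # Group extraction: map names to prefixes once, then repeatedly take the first
--     # remaining prefix, obtain its count as a length difference after filtering it
--     # out, and continue on the filtered remainder. Preserves first-occurrence order.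
--     pids = [name.split(split)[0] for name in bugs_names]
--     result = {}
--     while pids:
--         pid = pids[0]
--         rest = [p for p in pids if p != pid]
--         result[pid] = len(pids) - len(rest)
--         pids = rest
--     return result
-- ===== Notes on version B (the rewrite author's own statement) =====
-- stated objective: alternative
-- what changed: Replaced the one-pass dict-increment loop by group extraction: map names to prefixes once, then repeatedly take the first remaining prefix, obtain its count as a length difference after filtering it out, and continue on the filtered remainder; Pre_ excludes empty split, on which A raises ValueError.
import Mathlib
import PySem

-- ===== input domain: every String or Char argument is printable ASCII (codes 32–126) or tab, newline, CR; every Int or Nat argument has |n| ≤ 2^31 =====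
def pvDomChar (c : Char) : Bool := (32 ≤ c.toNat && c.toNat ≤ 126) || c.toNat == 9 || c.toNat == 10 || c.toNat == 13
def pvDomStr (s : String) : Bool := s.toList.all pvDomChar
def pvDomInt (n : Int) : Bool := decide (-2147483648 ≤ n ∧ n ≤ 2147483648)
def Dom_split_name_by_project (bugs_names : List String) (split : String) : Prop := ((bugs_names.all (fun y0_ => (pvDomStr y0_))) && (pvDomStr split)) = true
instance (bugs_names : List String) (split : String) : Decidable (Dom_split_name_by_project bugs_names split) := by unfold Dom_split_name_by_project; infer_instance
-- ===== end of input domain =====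

-- B replaces A's incremental dict-increment loop by recursive group-extraction over the
-- prefix list: take the first remaining prefix, count it by a length difference after
-- filtering it out, and recurse on the remainder (alternative algorithm, same key order).


-- ===== PORT A =====
-- pid = bug_name.split(split)[0]; split? is none exactly when split = "" (ValueError,
-- excluded by Pre_), and s.split(sep) is never empty, so index 0 always exists;
-- the .getD defaults are the unreachable error branches.
def pvPid (s sep : String) : String :=
  (PySem.List.pyGet? ((PySem.Str.split? s sep).getD []) 0).getD ""

def split_name_by_project (bugs_names : List String) (split : String) : List (String × Int) :=
  (bugs_names.foldl (fun splited_count bug_name =>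
      if splited_count.contains (pvPid bug_name split) then
        -- splited_count[pid] += 1
        splited_count.insert (pvPid bug_name split)
          (splited_count.getD (pvPid bug_name split) 0 + 1)
      else
        -- splited_count.update({pid: 1})  (A tests 'pid not in keys' first; negation kept exact)
        splited_count.insert (pvPid bug_name split) 1
    ) PySem.Dict.empty).items

-- ===== PORT B =====
-- count_groups: '[p for p in pids if p != pid]' filters the whole list, but the head
-- equals pid and is always dropped, so filtering the tail is the same list; the dict
-- literal + update over disjoint keys is the cons onto the recursive result.
def pvCountGroups : List String → List (String × Int)
  | [] => []
  | pid :: t =>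
      let rest := t.filter (fun p => p ≠ pid)
      (pid, ((t.length + 1) - rest.length : Nat)) :: pvCountGroups rest
termination_by l => l.length
decreasing_by
  simp only [List.length_cons, Nat.lt_succ_iff, List.length_unattach]
  exact le_trans (List.length_filter_le _ _) (by simp)

def split_name_by_project_alt (bugs_names : List String) (split : String) : List (String × Int) :=
  pvCountGroups (bugs_names.map (fun name => pvPid name split))

-- ===== PRECONDITION & SPEC =====
-- Pre_ excludes only split = "", on which Python's str.split raises ValueError (A returns nothing there).
def Pre_split_name_by_project (bugs_names : List String) (split : String) : Prop := split ≠ ""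
instance (bugs_names : List String) (split : String) : Decidable (Pre_split_name_by_project bugs_names split) := by unfold Pre_split_name_by_project; infer_instance
def pvWitness_split_name_by_project : List String × String := (["Lang_1", "Math_2", "Lang_3"], "_")

def Spec_split_name_by_project (bugs_names : List String) (split : String) (out : List (String × Int)) : Prop := out = split_name_by_project_alt bugs_names split
instance (bugs_names : List String) (split : String) (out : List (String × Int)) : Decidable (Spec_split_name_by_project bugs_names split out) := by unfold Spec_split_name_by_project; infer_instance

-- ===== CLAIM =====
def Claim_equal_split_name_by_project : Prop := ∀ (bugs_names : List String) (split : String), Dom_split_name_by_project bugs_names split → Pre_split_name_by_project bugs_names split → Spec_split_name_by_project bugs_names split (split_name_by_project bugs_names split)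

-- ===== LEMMAS AND PROOFS =====

-- A's branchy step equals the unconditional counter step.
lemma stepA_eq (d : PySem.Dict String Int) (pid : String) :
    (if d.contains pid then d.insert pid (d.getD pid 0 + 1) else d.insert pid 1)
      = d.insert pid (d.getD pid 0 + 1) := by
  by_cases h : d.contains pid = true
  · simp [h]
  · simp [h, PySem.Dict.getD_of_not_contains d (0 : Int) (by simpa using h)]

-- pushing a fresh element through Set.add-folding
lemma foldl_add_cons (l : List String) :
    ∀ (s : List String) (p : String), (∀ x ∈ l, x ≠ p) →
      l.foldl PySem.Set.add (p :: s) = p :: l.foldl PySem.Set.add s := by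
  induction l with
  | nil => intro s p _; rfl
  | cons x t ih =>
      intro s p h
      have hxp : x ≠ p := h x (by simp)
      have ht : ∀ y ∈ t, y ≠ p := fun y hy => h y (by simp [hy])
      have hadd : PySem.Set.add (p :: s) x = p :: PySem.Set.add s x := by
        simp [PySem.Set.add, PySem.Set.contains, hxp]
        split <;> rfl
      simp [List.foldl_cons, hadd, ih _ p ht]

-- folding add over a list ignores elements already present
lemma foldl_add_filter (l : List String) :
    ∀ (s : List String) (p : String), p ∈ s →
      l.foldl PySem.Set.add s = (l.filter (fun x => x ≠ p)).foldl PySem.Set.add s := by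
  induction l with
  | nil => intro s p _; rfl
  | cons x t ih =>
      intro s p hp
      by_cases hxp : x = p
      · subst hxp
        have : PySem.Set.add s x = s := by simp [PySem.Set.add, PySem.Set.contains, hp]
        simp [List.foldl_cons, this, ih s x hp]
      · have hmem : p ∈ PySem.Set.add s x := by
          simp [PySem.Set.add]; split <;> simp [hp]
        simp [List.foldl_cons, hxp, ih _ p hmem]

-- first-occurrence dedup unfolds one group at a time
lemma ofList_cons_filter (p : String) (t : List String) :
    PySem.Set.ofList (p :: t) = p :: PySem.Set.ofList (t.filter (fun x => x ≠ p)) := by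
  have h1 : PySem.Set.ofList (p :: t) = t.foldl PySem.Set.add [p] := by
    simp [PySem.Set.ofList_eq_foldl, PySem.Set.add, PySem.Set.contains]
  rw [h1, foldl_add_filter t [p] p (by simp),
      foldl_add_cons _ [] p (fun x hx => by simpa using (List.mem_filter.mp hx).2),
      PySem.Set.ofList_eq_foldl]

lemma pvCountGroups_nil : pvCountGroups [] = [] := by rw [pvCountGroups.eq_def]

lemma pvCountGroups_cons (p : String) (t : List String) :
    pvCountGroups (p :: t) =
      (p, (((t.length + 1) - (t.filter (fun x => x ≠ p)).length : Nat) : Int))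
        :: pvCountGroups (t.filter (fun x => x ≠ p)) := by
  rw [pvCountGroups.eq_def]

lemma length_filter_count (p : String) (t : List String) :
    (t.filter (fun x => x ≠ p)).length + t.count p = t.length := by
  induction t with
  | nil => simp
  | cons x t ih =>
      simp at ih
      simp only [List.filter_cons, List.count_cons]
      by_cases hxp : x = p
      · subst hxp; simp; omega
      · simp [hxp]; omega

-- filtering out a different key does not change a key's count
lemma count_filter_ne (k p : String) (hkp : k ≠ p) (t : List String) :
    (t.filter (fun x => x ≠ p)).count k = t.count k := by
  induction t with
  | nil => simp
  | cons y s ihs =>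
      simp at ihs
      simp only [List.filter_cons, List.count_cons]
      by_cases hyp : y = p
      · subst hyp; simp [Ne.symm hkp, ihs]
      · simp [hyp, List.count_cons, ihs]

-- B's recursion computes the counter's items list
lemma countGroups_eq (n : Nat) : ∀ (pids : List String), pids.length ≤ n →
    pvCountGroups pids = (PySem.Set.ofList pids).map (fun k => (k, (pids.count k : Int))) := by
  induction n with
  | zero =>
      intro pids h
      match pids with
      | [] => simp [pvCountGroups_nil]
  | succ n ih =>
      intro pids hlen
      match pids with
      | [] => simp [pvCountGroups_nil]
      | p :: t =>
          rw [pvCountGroups_cons, ofList_cons_filter]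
          have hcount := length_filter_count p t
          have hrest : (t.filter (fun x => x ≠ p)).length ≤ n := by
            have := List.length_filter_le (fun x => decide (x ≠ p)) t
            simp only [List.length_cons, Nat.succ_le_succ_iff] at hlen
            omega
          rw [ih _ hrest]
          simp only [List.map_cons, List.cons.injEq]
          refine ⟨?_, ?_⟩
          · have h1 : (t.length + 1) - (t.filter (fun x => x ≠ p)).length = t.count p + 1 := by
              omega
            simp only [Prod.mk.injEq, h1]
            simp
          · apply List.map_congr_left
            intro k hk
            have hkne : k ≠ p := by
              have hkmem := (PySem.Set.mem_ofList _ k).1 hk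
              exact (by simpa using (List.mem_filter.mp hkmem).2)
            have hcnt : (p :: t).count k = t.count k := by
              simp [Ne.symm hkne]
            rw [hcnt, count_filter_ne k p hkne t]

-- ===== VERDICT =====
theorem split_name_by_project_spec : Claim_equal_split_name_by_project := by
  intro bugs_names split _ _
  unfold Spec_split_name_by_project split_name_by_project split_name_by_project_alt
  have hA : (bugs_names.foldl (fun splited_count bug_name =>
        if splited_count.contains (pvPid bug_name split) then
          splited_count.insert (pvPid bug_name split)
            (splited_count.getD (pvPid bug_name split) 0 + 1)
        else
          splited_count.insert (pvPid bug_name split) 1)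
        (PySem.Dict.empty : PySem.Dict String Int))
      = PySem.Dict.counter (bugs_names.map (fun name => pvPid name split)) := by
    rw [← PySem.Dict.foldl_insert_getD_add_one_eq_counter, List.foldl_map]
    exact PySem.List.foldl_congr_mem bugs_names _ _ _
      (fun acc x _ => stepA_eq acc (pvPid x split))
  rw [hA, PySem.Dict.items_counter, countGroups_eq _ _ (le_refl _)]
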